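-- pv_equiv track=rewrite | github.com/esceptico/lel | lel/utils.py | mask_words
-- ===== SOURCE A (Python) =====
-- def mask_words(word_ids):
--     token_ids = []
--     seen = set()
--     for i, word_id in enumerate(word_ids):
--         if word_id in seen or word_id is None:
--             token_ids.append(i)
--         seen.add(word_id)
--     return token_ids
-- ===== SOURCE B (Python) =====
-- def mask_words(word_ids):
--     first = {}
--     for i, w in enumerate(word_ids):
--         if w not in first:
--             first[w] = i
--     return [i for i, w in enumerate(word_ids) if w is None or first[w] != i]
-- ===== Notes on version B (the rewrite author's own statement) =====
-- stated objective: alternative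
-- what changed: Replaces the single streaming pass with a growing seen-set by a two-pass scheme: one pass builds a first-occurrence index table, a second pass emits every index that is None or not its word_id's first occurrence.
import Mathlib
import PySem

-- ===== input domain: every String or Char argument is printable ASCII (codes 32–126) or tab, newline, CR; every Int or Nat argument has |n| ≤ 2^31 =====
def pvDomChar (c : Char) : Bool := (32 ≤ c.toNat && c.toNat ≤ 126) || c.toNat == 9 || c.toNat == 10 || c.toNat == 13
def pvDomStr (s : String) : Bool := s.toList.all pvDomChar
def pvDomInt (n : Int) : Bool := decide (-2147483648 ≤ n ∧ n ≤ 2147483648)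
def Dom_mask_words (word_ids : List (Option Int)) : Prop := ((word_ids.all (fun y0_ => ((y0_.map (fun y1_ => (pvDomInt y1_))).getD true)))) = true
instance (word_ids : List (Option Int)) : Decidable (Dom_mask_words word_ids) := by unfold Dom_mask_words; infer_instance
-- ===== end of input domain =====

-- B replaces A's single streaming pass (growing seen-set) by a two-pass scheme: build a
-- first-occurrence index table, then emit every index that is None or not its first occurrence
-- (alternative decomposition, same asymptotic cost).

-- ===== PORT A =====
def mask_words (word_ids : List (Option Int)) : List Int :=
  ((PySem.List.enumerate word_ids 0).foldl
    (fun acc p =>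
      (if PySem.Set.contains acc.2 p.2 || p.2 == none then acc.1 ++ [p.1] else acc.1,
       PySem.Set.add acc.2 p.2))
    (([] : List Int), (PySem.Set.empty : PySem.Set (Option Int)))).1

-- ===== PORT B =====
def mask_words_alt (word_ids : List (Option Int)) : List Int :=
  let first := (PySem.List.enumerate word_ids 0).foldl
    (fun d p => if d.contains p.2 then d else d.insert p.2 p.1)
    (PySem.Dict.empty : PySem.Dict (Option Int) Int)
  ((PySem.List.enumerate word_ids 0).filter
      (fun p => p.2 == none || PySem.Dict.getD first p.2 0 != p.1)).map (·.1)

-- ===== PRECONDITION & SPEC =====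
def Spec_mask_words (word_ids : List (Option Int)) (out : List Int) : Prop := out = mask_words_alt word_ids
instance (word_ids : List (Option Int)) (out : List Int) : Decidable (Spec_mask_words word_ids out) := by unfold Spec_mask_words; infer_instance

-- ===== CLAIM (what is proved, stated in full; the proofs are below) =====
def Claim_equal_mask_words : Prop := ∀ (word_ids : List (Option Int)), Dom_mask_words word_ids → Spec_mask_words word_ids (mask_words word_ids)

-- ===== LEMMAS AND PROOFS =====

-- reference function: emit index s for each element that is None or already in `seen`
def maskRef : List (Option Int) → Int → PySem.Set (Option Int) → List Int
  | [], _, _ => []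
  | w :: xs, s, seen =>
      (if PySem.Set.contains seen w || w == none then [s] else [])
        ++ maskRef xs (s + 1) (PySem.Set.add seen w)

theorem loopA_eq (xs : List (Option Int)) : ∀ (s : Int) (out : List Int) (seen : PySem.Set (Option Int)),
    ((PySem.List.enumerate xs s).foldl
      (fun acc p =>
        (if PySem.Set.contains acc.2 p.2 || p.2 == none then acc.1 ++ [p.1] else acc.1,
         PySem.Set.add acc.2 p.2))
      (out, seen)).1 = out ++ maskRef xs s seen := by
  induction xs with
  | nil => intro s out seen; simp [PySem.List.enumerate_nil, maskRef]
  | cons w xs ih =>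
    intro s out seen
    rw [PySem.List.enumerate_cons, List.foldl_cons]
    simp only [maskRef]
    split
    · rw [ih]; simp
    · rw [ih]; simp

theorem build_preserve (xs : List (Option Int)) : ∀ (s : Int) (d : PySem.Dict (Option Int) Int)
    (w : Option Int) (j : Int), d.get? w = some j →
    ((PySem.List.enumerate xs s).foldl
      (fun d p => if d.contains p.2 then d else d.insert p.2 p.1) d).get? w = some j := by
  induction xs with
  | nil => intro s d w j h; simpa [PySem.List.enumerate_nil] using h
  | cons x xs ih =>
    intro s d w j h
    rw [PySem.List.enumerate_cons, List.foldl_cons]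
    by_cases hc : d.contains x = true
    · simp only [hc, if_true]; exact ih _ _ _ _ h
    · rw [Bool.not_eq_true] at hc
      simp only [hc, Bool.false_eq_true, if_false]
      apply ih
      have hwx : w ≠ x := by
        intro he; subst he
        rw [PySem.Dict.contains_eq_isSome_get?, h] at hc; simp at hc
      rw [PySem.Dict.get?_insert_of_ne _ _ hwx, h]

theorem step_inv1 (d : PySem.Dict (Option Int) Int) (seen : PySem.Set (Option Int))
    (w : Option Int) (s : Int)
    (hcont : ∀ x, d.contains x = PySem.Set.contains seen x) :
    ∀ x, (if d.contains w then d else d.insert w s).contains x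
      = PySem.Set.contains (PySem.Set.add seen w) x := by
  intro x
  by_cases hc : d.contains w = true
  · have hmem : w ∈ seen := by
      rw [← PySem.Set.contains_iff]; rw [← hcont]; exact hc
    simp only [hc, if_true]
    rw [PySem.Set.add_of_mem hmem]; exact hcont x
  · rw [Bool.not_eq_true] at hc
    simp only [hc, Bool.false_eq_true, if_false]
    rw [PySem.Dict.contains_insert, hcont x]
    rw [Bool.eq_iff_iff]
    simp only [Bool.or_eq_true, beq_iff_eq, PySem.Set.contains_iff, PySem.Set.mem_add]
    tauto

theorem step_inv2 (d : PySem.Dict (Option Int) Int) (w : Option Int) (s : Int)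
    (hbnd : ∀ x j, d.get? x = some j → j < s) :
    ∀ x j, (if d.contains w then d else d.insert w s).get? x = some j → j < s + 1 := by
  intro x j hg
  by_cases hc : d.contains w = true
  · simp only [hc, if_true] at hg
    have := hbnd _ _ hg; omega
  · rw [Bool.not_eq_true] at hc
    simp only [hc, Bool.false_eq_true, if_false] at hg
    by_cases hxw : x = w
    · subst hxw; rw [PySem.Dict.get?_insert_self] at hg
      injection hg with he; omega
    · rw [PySem.Dict.get?_insert_of_ne _ _ hxw] at hg
      have := hbnd _ _ hg; omega

theorem filter_eq (xs : List (Option Int)) : ∀ (s : Int) (d : PySem.Dict (Option Int) Int)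
    (seen : PySem.Set (Option Int)),
    (∀ w, d.contains w = PySem.Set.contains seen w) →
    (∀ w j, d.get? w = some j → j < s) →
    ((PySem.List.enumerate xs s).filter
        (fun p => p.2 == none ||
          PySem.Dict.getD ((PySem.List.enumerate xs s).foldl
            (fun d p => if d.contains p.2 then d else d.insert p.2 p.1) d) p.2 0 != p.1)).map (·.1)
      = maskRef xs s seen := by
  induction xs with
  | nil => intro s d seen _ _; simp [PySem.List.enumerate_nil, maskRef]
  | cons w xs ih =>
    intro s d seen hcont hbnd
    rw [PySem.List.enumerate_cons, List.foldl_cons, List.filter_cons]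
    match w with
    | none =>
      have h1 : (((none : Option Int) == none) ||
          PySem.Dict.getD ((PySem.List.enumerate xs (s+1)).foldl
            (fun d p => if d.contains p.2 then d else d.insert p.2 p.1)
            (if d.contains none then d else d.insert none s)) none 0 != s) = true := by
        rw [show ((none : Option Int) == none) = true from rfl]; simp
      simp only [h1, if_true]
      rw [List.map_cons]
      simp only [maskRef]
      rw [ih (s+1) _ (PySem.Set.add seen none) (step_inv1 d seen none s hcont)
            (step_inv2 d none s hbnd)]
      simp
    | some v =>
      by_cases hc : d.contains (some v) = true
      · obtain ⟨j, hj⟩ : ∃ j, d.get? (some v) = some j := by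
          have hiso := PySem.Dict.contains_eq_isSome_get? (d := d) (k := some v)
          rw [hc] at hiso
          cases hg : d.get? (some v) with
          | none => rw [hg] at hiso; simp at hiso
          | some j => exact ⟨j, rfl⟩
        have hD : ((PySem.List.enumerate xs (s+1)).foldl
            (fun d p => if d.contains p.2 then d else d.insert p.2 p.1)
            (if d.contains (some v) then d else d.insert (some v) s)).get? (some v) = some j := by
          apply build_preserve
          simp only [hc, if_true]; exact hj
        have hjs : j ≠ s := by have := hbnd _ _ hj; omega
        have hcond : (((some v : Option Int) == none) ||
            PySem.Dict.getD ((PySem.List.enumerate xs (s+1)).foldl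
              (fun d p => if d.contains p.2 then d else d.insert p.2 p.1)
              (if d.contains (some v) then d else d.insert (some v) s)) (some v) 0 != s) = true := by
          rw [PySem.Dict.getD_eq_get?_getD, hD]
          simp [hjs]
        simp only [hcond, if_true]
        rw [List.map_cons]
        have hseen : PySem.Set.contains seen (some v) = true := by rw [← hcont]; exact hc
        simp only [maskRef, hseen, Bool.true_or, if_true]
        rw [ih (s+1) _ (PySem.Set.add seen (some v)) (step_inv1 d seen (some v) s hcont)
              (step_inv2 d (some v) s hbnd)]
        rfl
      · have hcf : d.contains (some v) = false := by rw [← Bool.not_eq_true]; exact hc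
        have hD : ((PySem.List.enumerate xs (s+1)).foldl
            (fun d p => if d.contains p.2 then d else d.insert p.2 p.1)
            (if d.contains (some v) then d else d.insert (some v) s)).get? (some v) = some s := by
          apply build_preserve
          simp only [hcf, Bool.false_eq_true, if_false]
          exact PySem.Dict.get?_insert_self _ _ _
        have hcond : (((some v : Option Int) == none) ||
            PySem.Dict.getD ((PySem.List.enumerate xs (s+1)).foldl
              (fun d p => if d.contains p.2 then d else d.insert p.2 p.1)
              (if d.contains (some v) then d else d.insert (some v) s)) (some v) 0 != s) = false := by
          rw [PySem.Dict.getD_eq_get?_getD, hD]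
          rw [show ((some v : Option Int) == none) = false from rfl]
          simp
        simp only [hcond, Bool.false_eq_true, if_false]
        have hseen : PySem.Set.contains seen (some v) = false := by rw [← hcont]; exact hcf
        simp only [maskRef, hseen, Bool.false_eq_true, Bool.false_or,
          show ((some v : Option Int) == none) = false from rfl, if_false]
        rw [ih (s+1) _ (PySem.Set.add seen (some v)) (step_inv1 d seen (some v) s hcont)
              (step_inv2 d (some v) s hbnd)]
        rfl

-- ===== VERDICT (by name: the statement is the Claim_ definition above) =====
theorem mask_words_spec : Claim_equal_mask_words := by
  intro word_ids _
  unfold Spec_mask_words mask_words mask_words_alt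
  rw [loopA_eq]
  rw [filter_eq word_ids 0 PySem.Dict.empty PySem.Set.empty
        (by intro w; simp [PySem.Dict.contains_empty, PySem.Set.empty])
        (by intro w j h; rw [PySem.Dict.get?_empty] at h; cases h)]
  simp
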